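-- pv_equiv track=rewrite | github.com/jeqcho/single-winner-generative-social-choice | src/sample_alt_voters/plot_what_if_scatter.py | construct_101_preferences
-- ===== SOURCE A (Python) =====
-- from typing import Dict, List, Tuple, Optional
--
-- def construct_101_preferences(
--     preferences: List[List[str]],
--     insertion_positions: List[int]
-- ) -> List[List[str]]:
--     """
--     Construct 101-alternative preference profile by inserting new statement.
--
--     Args:
--         preferences: Original 100x100 preference matrix [rank][voter]
--         insertion_positions: List of positions where "100" should be inserted for each voter
--
--     Returns:
--         New preference matrix with 101 alternatives [rank][voter]
--     """
--     n_ranks = len(preferences)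
--     n_voters = len(preferences[0]) if preferences else 0
--
--     # Convert to voter-centric format, insert "100", then convert back
--     # preferences[rank][voter] -> voter_rankings[voter][rank]
--     voter_rankings = []
--     for voter_idx in range(n_voters):
--         ranking = [preferences[rank][voter_idx] for rank in range(n_ranks)]
--         voter_rankings.append(ranking)
--
--     # Insert "100" at specified position for each voter
--     for voter_idx, pos in enumerate(insertion_positions):
--         if pos is not None and voter_idx < len(voter_rankings):
--             # Clamp position to valid range
--             pos = max(0, min(pos, len(voter_rankings[voter_idx])))
--             voter_rankings[voter_idx].insert(pos, "100")
--
--     # Convert back to [rank][voter] format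
--     n_new_ranks = 101
--     new_preferences = []
--     for rank in range(n_new_ranks):
--         rank_row = []
--         for voter_idx in range(n_voters):
--             if rank < len(voter_rankings[voter_idx]):
--                 rank_row.append(voter_rankings[voter_idx][rank])
--             else:
--                 rank_row.append("100")  # Fallback
--         new_preferences.append(rank_row)
--
--     return new_preferences
-- ===== SOURCE B (Python) =====
-- def construct_101_preferences(preferences, insertion_positions):
--     n_ranks = len(preferences)
--     n_voters = len(preferences[0]) if preferences else 0
--
--     # Effective (clamped) insertion position per voter; None = no insertion.
--     eff = []
--     for v in range(n_voters):
--         p = insertion_positions[v] if v < len(insertion_positions) else None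
--         eff.append(None if p is None else max(0, min(p, n_ranks)))
--
--     # Build the [rank][voter] matrix directly by index arithmetic.
--     out = []
--     for rank in range(101):
--         row = []
--         for v in range(n_voters):
--             p = eff[v]
--             if p is None:
--                 row.append(preferences[rank][v] if rank < n_ranks else "100")
--             elif rank < p:
--                 row.append(preferences[rank][v])
--             elif rank == p:
--                 row.append("100")
--             elif rank - 1 < n_ranks:
--                 row.append(preferences[rank - 1][v])
--             else:
--                 row.append("100")
--         out.append(row)
--     return out
-- ===== Notes on version B (the rewrite author's own statement) =====
-- stated objective: simpler
-- what changed: Replaces the transpose-to-voter-rankings / list.insert / transpose-back pipeline with a single direct construction of the 101 x n_voters matrix: each voter gets one precomputed clamped insertion position and every cell is chosen by index arithmetic (rank < p, rank == p, rank-1 shift, '100' fallback); this skips the two transposes and the element-shifting list.insert.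
import Mathlib
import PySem

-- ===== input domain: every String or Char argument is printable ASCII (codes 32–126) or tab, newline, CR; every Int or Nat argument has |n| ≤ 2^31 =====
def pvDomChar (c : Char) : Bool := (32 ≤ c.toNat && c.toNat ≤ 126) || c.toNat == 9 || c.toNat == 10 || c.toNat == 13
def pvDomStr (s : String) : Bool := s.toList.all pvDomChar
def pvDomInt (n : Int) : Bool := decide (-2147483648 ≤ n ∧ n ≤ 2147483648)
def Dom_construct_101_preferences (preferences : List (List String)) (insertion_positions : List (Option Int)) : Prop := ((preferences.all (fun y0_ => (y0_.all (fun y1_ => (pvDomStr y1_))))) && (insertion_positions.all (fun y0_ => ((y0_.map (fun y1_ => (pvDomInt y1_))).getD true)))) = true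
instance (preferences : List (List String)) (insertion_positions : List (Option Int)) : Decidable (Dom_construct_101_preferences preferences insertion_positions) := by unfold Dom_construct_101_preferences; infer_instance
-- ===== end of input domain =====

-- B replaces A's transpose / list.insert / transpose-back pipeline with one direct per-cell
-- index-arithmetic construction from precomputed clamped insertion positions (objective: simpler).

-- ===== PORT A =====
-- A's comprehension 'ranking = [preferences[rank][voter_idx] for rank in range(n_ranks)]'
def pvRankingA (preferences : List (List String)) (n_ranks : Nat) (voter_idx : Nat) : List String :=
  (List.range n_ranks).map (fun rank => (preferences.getD rank []).getD voter_idx "")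

-- A's 'for voter_idx, pos in enumerate(insertion_positions): …' loop (i is the enumerate index)
def pvInsertLoopA (vr : List (List String)) (ips : List (Option Int)) (i : Nat) : List (List String) :=
  match ips with
  | [] => vr
  | pos :: rest =>
    let vr' :=
      match pos with
      | none => vr
      | some p =>
        if i < vr.length then
          let rk := vr.getD i []
          vr.set i (PySem.List.insert rk (max 0 (min p (rk.length : Int))) "100")
        else vr
    pvInsertLoopA vr' rest (i + 1)

def construct_101_preferences (preferences : List (List String)) (insertion_positions : List (Option Int)) : List (List String) :=
  let n_ranks := preferences.length
  let n_voters := if preferences.isEmpty then 0 else (preferences.headD []).length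
  let voter_rankings := (List.range n_voters).map (pvRankingA preferences n_ranks)
  let voter_rankings2 := pvInsertLoopA voter_rankings insertion_positions 0
  (List.range 101).map (fun rank =>
    (List.range n_voters).map (fun voter_idx =>
      let rkg := voter_rankings2.getD voter_idx []
      if rank < rkg.length then rkg.getD rank "" else "100"))

-- ===== PORT B =====
def construct_101_preferences_alt (preferences : List (List String)) (insertion_positions : List (Option Int)) : List (List String) :=
  let n_ranks := preferences.length
  let n_voters := if preferences.isEmpty then 0 else (preferences.headD []).length
  let eff : List (Option Int) := (List.range n_voters).map (fun v =>
    match (if v < insertion_positions.length then insertion_positions.getD v none else none) with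
    | none => none
    | some p => some (max 0 (min p (n_ranks : Int))))
  (List.range 101).map (fun rank =>
    (List.range n_voters).map (fun v =>
      match eff.getD v none with
      | none => if rank < n_ranks then (preferences.getD rank []).getD v "" else "100"
      | some p =>
        if (rank : Int) < p then (preferences.getD rank []).getD v ""
        else if (rank : Int) = p then "100"
        else if rank - 1 < n_ranks then (preferences.getD (rank - 1) []).getD v ""
        else "100"))

-- ===== PRECONDITION & SPEC =====
-- Pre_ excludes exactly the ragged matrices on which Python A raises IndexError
-- (a row shorter than the first row, indexed by 'preferences[rank][voter_idx]').
def Pre_construct_101_preferences (preferences : List (List String)) (insertion_positions : List (Option Int)) : Prop :=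
  ∀ row ∈ preferences, (preferences.headD []).length ≤ row.length
instance (preferences : List (List String)) (insertion_positions : List (Option Int)) : Decidable (Pre_construct_101_preferences preferences insertion_positions) := by unfold Pre_construct_101_preferences; infer_instance

def pvWitness_construct_101_preferences : List (List String) × List (Option Int) :=
  ([["a", "b"], ["c", "d"]], [some 1, none])

def Spec_construct_101_preferences (preferences : List (List String)) (insertion_positions : List (Option Int)) (out : List (List String)) : Prop := out = construct_101_preferences_alt preferences insertion_positions
instance (preferences : List (List String)) (insertion_positions : List (Option Int)) (out : List (List String)) : Decidable (Spec_construct_101_preferences preferences insertion_positions out) := by unfold Spec_construct_101_preferences; infer_instance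

-- ===== CLAIM (what is proved, stated in full; the proofs are below) =====
def Claim_equal_construct_101_preferences : Prop := ∀ (preferences : List (List String)) (insertion_positions : List (Option Int)), Dom_construct_101_preferences preferences insertion_positions → Pre_construct_101_preferences preferences insertion_positions → Spec_construct_101_preferences preferences insertion_positions (construct_101_preferences preferences insertion_positions)

-- ===== LEMMAS AND PROOFS =====

theorem pvMapRange_getElem? {β : Type} (f : Nat → β) (n k : Nat) :
    ((List.range n).map f)[k]? = if k < n then some (f k) else none := by
  by_cases h : k < n
  · rw [if_pos h]
    simp [List.getElem?_map, List.getElem?_range h]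
  · rw [if_neg h, List.getElem?_eq_none_iff]
    simp
    omega


theorem pvTakeConsDrop_length (l : List String) (p : Nat) (x : String) (hp : p ≤ l.length) :
    (l.take p ++ x :: l.drop p).length = l.length + 1 := by
  simp

theorem pvTakeConsDrop_getElem? (l : List String) (p : Nat) (x : String) (hp : p ≤ l.length) (j : Nat) :
    (l.take p ++ x :: l.drop p)[j]? =
      if j < p then l[j]? else if j = p then some x else l[j - 1]? := by
  rcases lt_trichotomy j p with h | h | h
  · rw [if_pos h, List.getElem?_append_left (by simp; omega)]
    simp [List.getElem?_take, h]
  · subst h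
    rw [if_neg (by omega), if_pos rfl, List.getElem?_append_right (by simp)]
    simp [Nat.min_eq_left hp]
  · rw [if_neg (by omega), if_neg (by omega), List.getElem?_append_right (by simp; omega)]
    have h1 : j - (l.take p).length = (j - p - 1) + 1 := by simp [Nat.min_eq_left hp]; omega
    rw [h1, List.getElem?_cons_succ, List.getElem?_drop]
    have h2 : p + (j - p - 1) = j - 1 := by omega
    rw [h2]

theorem pvInsertLoopA_getElem? (ips : List (Option Int)) (vr : List (List String)) (i v : Nat) :
    (pvInsertLoopA vr ips i)[v]? =
      if v < i ∨ vr.length ≤ v then vr[v]?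
      else
        match ips[v - i]? with
        | some (some p) =>
            some (PySem.List.insert (vr.getD v []) (max 0 (min p ((vr.getD v []).length : Int))) "100")
        | _ => vr[v]? := by
  induction ips generalizing vr i with
  | nil =>
    simp only [pvInsertLoopA, List.getElem?_nil]
    split
    · rfl
    · rfl
  | cons pos rest ih =>
    cases pos with
    | none =>
      simp only [pvInsertLoopA]
      rw [ih]
      rcases lt_trichotomy v i with h | h | h
      · rw [if_pos (Or.inl (by omega)), if_pos (Or.inl h)]
      · subst h
        by_cases hl : vr.length ≤ v
        · rw [if_pos (Or.inl (by omega)), if_pos (Or.inr hl)]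
        · rw [if_pos (Or.inl (by omega)), if_neg (by omega)]
          have h0 : v - v = 0 := by omega
          rw [h0, List.getElem?_cons_zero]
      · by_cases hl : vr.length ≤ v
        · rw [if_pos (Or.inr hl), if_pos (Or.inr hl)]
        · rw [if_neg (by omega), if_neg (by omega)]
          have hsub : v - i = (v - (i + 1)) + 1 := by omega
          rw [hsub, List.getElem?_cons_succ]
    | some p =>
      simp only [pvInsertLoopA]
      by_cases hg : i < vr.length
      · rw [if_pos hg]
        set vr2 := vr.set i (PySem.List.insert (vr.getD i []) (max 0 (min p ((vr.getD i []).length : Int))) "100") with hvr2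
        have hlen : vr2.length = vr.length := by simp [hvr2]
        rw [ih]
        rcases lt_trichotomy v i with h | h | h
        · have hne : vr2[v]? = vr[v]? := List.getElem?_set_ne (by omega)
          rw [if_pos (Or.inl (by omega)), if_pos (Or.inl h), hne]
        · subst h
          rw [if_pos (Or.inl (by omega)), if_neg (by omega)]
          have h0 : v - v = 0 := by omega
          rw [h0, List.getElem?_cons_zero]
          rw [hvr2, List.getElem?_set_self hg]
        · have hne : vr2[v]? = vr[v]? := List.getElem?_set_ne (by omega)
          have hD : vr2.getD v [] = vr.getD v [] := by
            rw [List.getD_eq_getElem?_getD, hne, List.getD_eq_getElem?_getD]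
          by_cases hl : vr.length ≤ v
          · rw [if_pos (Or.inr (by omega : vr2.length ≤ v)), if_pos (Or.inr hl), hne]
          · rw [if_neg (by omega), if_neg (by omega)]
            have hsub : v - i = (v - (i + 1)) + 1 := by omega
            rw [hsub, List.getElem?_cons_succ, hne, hD]
      · rw [if_neg hg, ih]
        rcases lt_trichotomy v i with h | h | h
        · rw [if_pos (Or.inl (by omega)), if_pos (Or.inl h)]
        · subst h
          have hl : vr.length ≤ v := by omega
          rw [if_pos (Or.inl (by omega)), if_pos (Or.inr hl)]
        · by_cases hl : vr.length ≤ v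
          · rw [if_pos (Or.inr hl), if_pos (Or.inr hl)]
          · rw [if_neg (by omega), if_neg (by omega)]
            have hsub2 : v - i = (v - (i + 1)) + 1 := by omega
            rw [hsub2, List.getElem?_cons_succ]

-- ===== VERDICT (by name: the statement is the Claim_ definition above) =====
theorem construct_101_preferences_spec : Claim_equal_construct_101_preferences := by
  intro prefs ips _ _
  unfold Spec_construct_101_preferences construct_101_preferences construct_101_preferences_alt
  simp only []
  refine List.map_congr_left (fun rank _ => ?_)
  refine List.map_congr_left (fun v hv => ?_)
  rw [List.mem_range] at hv
  set n_ranks := prefs.length with hnr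
  set n_voters := if prefs.isEmpty then 0 else (prefs.headD []).length with hnv
  set Bv := pvRankingA prefs n_ranks v with hBv
  have hBvlen : Bv.length = n_ranks := by simp [hBv, pvRankingA]
  have hBvget : ∀ j, Bv[j]? = if j < n_ranks then some ((prefs.getD j []).getD v "") else none := by
    intro j; rw [hBv, pvRankingA, pvMapRange_getElem?]
  have hbase : ((List.range n_voters).map (pvRankingA prefs n_ranks))[v]? = some Bv := by
    rw [pvMapRange_getElem?, if_pos hv, hBv]
  have hbaselen : ((List.range n_voters).map (pvRankingA prefs n_ranks)).length = n_voters := by simp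
  have hbaseD : ((List.range n_voters).map (pvRankingA prefs n_ranks)).getD v [] = Bv := by
    rw [List.getD_eq_getElem?_getD, hbase]; rfl
  have heff : ((List.range n_voters).map (fun v =>
      match (if v < ips.length then ips.getD v none else none) with
      | none => none
      | some p => some (max 0 (min p (n_ranks : Int))))).getD v none =
      (match (if v < ips.length then ips.getD v none else none) with
      | none => none
      | some p => some (max 0 (min p (n_ranks : Int)))) := by
    rw [List.getD_eq_getElem?_getD, pvMapRange_getElem?, if_pos hv]; rfl
  have hloop := pvInsertLoopA_getElem? ips ((List.range n_voters).map (pvRankingA prefs n_ranks)) 0 v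
  rw [hbaselen] at hloop
  rw [if_neg (by omega)] at hloop
  simp only [Nat.sub_zero, hbaseD] at hloop
  have hD : (pvInsertLoopA ((List.range n_voters).map (pvRankingA prefs n_ranks)) ips 0).getD v [] =
      (match ips[v]? with
      | some (some p) => PySem.List.insert Bv (max 0 (min p (Bv.length : Int))) "100"
      | _ => Bv) := by
    rw [List.getD_eq_getElem?_getD, hloop]
    cases h : ips[v]? with
    | none => simp [hbase]
    | some o => cases o <;> simp [hbase]
  rw [heff, hD]
  cases hip : ips[v]? with
  | none =>
    have hlen : ips.length ≤ v := by simpa [List.getElem?_eq_none_iff] using hip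
    have hnotlt : ¬ v < ips.length := by omega
    simp only [if_neg hnotlt, hBvlen]
    by_cases h : rank < n_ranks
    · rw [if_pos h, List.getD_eq_getElem?_getD, hBvget, if_pos h, Option.getD_some, if_pos h]
    · rw [if_neg h, if_neg h]
  | some o =>
    have hlt : v < ips.length := by
      by_contra h
      rw [List.getElem?_eq_none_iff.2 (by omega)] at hip; cases hip
    have hgetD : ips.getD v none = o := by rw [List.getD_eq_getElem?_getD, hip]; rfl
    cases o with
    | none =>
      simp only [hgetD, if_pos hlt, hBvlen]
      by_cases h : rank < n_ranks
      · rw [if_pos h, List.getD_eq_getElem?_getD, hBvget, if_pos h, Option.getD_some, if_pos h]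
      · rw [if_neg h, if_neg h]
    | some p =>
      simp only [hgetD, if_pos hlt, hBvlen]
      set c : Int := max 0 (min p (n_ranks : Int)) with hc
      have hc0 : 0 ≤ c := le_max_left 0 _
      have hcn : c ≤ (n_ranks : Int) := by omega
      set pc : Nat := c.toNat with hpc
      have hcast : (pc : Int) = c := Int.toNat_of_nonneg hc0
      have hpcle : pc ≤ Bv.length := by rw [hBvlen]; omega
      have hpcn : pc ≤ n_ranks := by omega
      have hins : PySem.List.insert Bv c "100" = Bv.take pc ++ "100" :: Bv.drop pc := by
        rw [← hcast, PySem.List.insert_natCast Bv pc "100" hpcle]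
      rw [hins, pvTakeConsDrop_length Bv pc "100" hpcle, hBvlen]
      rcases lt_trichotomy rank pc with h | h | h
      · have h1 : rank < n_ranks := by omega
        have hi1 : (rank : Int) < c := by rw [← hcast]; exact_mod_cast h
        rw [if_pos (by omega : rank < n_ranks + 1), List.getD_eq_getElem?_getD,
          pvTakeConsDrop_getElem? Bv pc "100" hpcle, if_pos h, hBvget, if_pos h1, Option.getD_some,
          if_pos hi1]
      · have hi1 : ¬ ((rank : Int) < c) := by rw [← hcast]; omega
        have hi2 : (rank : Int) = c := by rw [← hcast]; exact_mod_cast h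
        rw [if_pos (by omega : rank < n_ranks + 1), List.getD_eq_getElem?_getD,
          pvTakeConsDrop_getElem? Bv pc "100" hpcle, if_neg (by omega), if_pos h, Option.getD_some,
          if_neg hi1, if_pos hi2]
      · have hi1 : ¬ ((rank : Int) < c) := by rw [← hcast]; omega
        have hi2 : ¬ ((rank : Int) = c) := by rw [← hcast]; omega
        rw [if_neg hi1, if_neg hi2]
        by_cases h2 : rank < n_ranks + 1
        · have h3 : rank - 1 < n_ranks := by omega
          rw [if_pos h2, if_pos h3, List.getD_eq_getElem?_getD,
            pvTakeConsDrop_getElem? Bv pc "100" hpcle, if_neg (by omega), if_neg (by omega),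
            hBvget, if_pos h3, Option.getD_some]
        · rw [if_neg h2, if_neg (by omega : ¬ (rank - 1 < n_ranks))]
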